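-- pv_equiv track=rewrite | github.com/mmi-swe/Smart-Cultural-Storyteller | backend/services.py | split_story_into_scenes
-- ===== SOURCE A (Python) =====
-- from typing import List, Dict
--
-- def split_story_into_scenes(story_text: str, max_images: int = 3) -> List[Dict]:
--     paragraphs = [p.strip() for p in story_text.split('\n') if p.strip()]
--     if not paragraphs:
--         return [{'type': 'text', 'content': story_text}]
--
--     total = len(paragraphs)
--     slots = min(max_images, total)
--     result: List[Dict] = []
--     buffer: List[str] = []
--
--     if slots == 0:
--         return [{'type': 'text', 'content': story_text}]
--
--     step = max(1, total // (slots + 1))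
--     image_positions = {min(total - 1, step * i) for i in range(1, slots + 1)}
--
--     for idx, para in enumerate(paragraphs):
--         buffer.append(para)
--         if idx in image_positions:
--             text_chunk = '\n\n'.join(buffer).strip()
--             if text_chunk:
--                 result.append({'type': 'text', 'content': text_chunk})
--             excerpt = '\n\n'.join(buffer[-2:]) if len(buffer) >= 2 else buffer[-1]
--             result.append({'type': 'image', 'scene_text': excerpt})
--             buffer = []
--
--     if buffer:
--         result.append({'type': 'text', 'content': '\n\n'.join(buffer)})
--
--     return result
-- ===== SOURCE B (Python) =====
-- from typing import List, Dict
--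
-- def split_story_into_scenes(story_text: str, max_images: int = 3) -> List[Dict]:
--     paragraphs = [q for q in (p.strip() for p in story_text.split('\n')) if q]
--     if not paragraphs:
--         return [{'type': 'text', 'content': story_text}]
--
--     total = len(paragraphs)
--     slots = min(max_images, total)
--     if slots == 0:
--         return [{'type': 'text', 'content': story_text}]
--
--     step = max(1, total // (slots + 1))
--     cuts = sorted({min(total - 1, step * i) for i in range(1, slots + 1)})
--
--     # stage 1: chunk the paragraphs into the segments ending at each cut, plus remainder
--     segments: List[List[str]] = []
--     rest = paragraphs
--     prev = -1
--     for pos in cuts: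
--         segments.append(rest[:pos - prev])
--         rest = rest[pos - prev:]
--         prev = pos
--
--     # stage 2: each segment yields a text dict and an image dict
--     scenes = [d for seg in segments
--                 for d in ({'type': 'text', 'content': '\n\n'.join(seg)},
--                           {'type': 'image', 'scene_text': '\n\n'.join(seg[-2:])})]
--     if rest:
--         scenes.append({'type': 'text', 'content': '\n\n'.join(rest)})
--     return scenes
-- ===== Notes on version B (the rewrite author's own statement) =====
-- stated objective: alternative
-- what changed: A makes one pass over the paragraphs with a buffer, testing every index against the image-position set and flushing dicts in-loop; B is staged: it first chunks the paragraph list into segments by slicing at the sorted boundary positions, then flat-maps each segment into its text/image dict pair (with the excerpt as an unconditional join of the last two elements), appending the remainder at the end.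
import Mathlib
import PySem

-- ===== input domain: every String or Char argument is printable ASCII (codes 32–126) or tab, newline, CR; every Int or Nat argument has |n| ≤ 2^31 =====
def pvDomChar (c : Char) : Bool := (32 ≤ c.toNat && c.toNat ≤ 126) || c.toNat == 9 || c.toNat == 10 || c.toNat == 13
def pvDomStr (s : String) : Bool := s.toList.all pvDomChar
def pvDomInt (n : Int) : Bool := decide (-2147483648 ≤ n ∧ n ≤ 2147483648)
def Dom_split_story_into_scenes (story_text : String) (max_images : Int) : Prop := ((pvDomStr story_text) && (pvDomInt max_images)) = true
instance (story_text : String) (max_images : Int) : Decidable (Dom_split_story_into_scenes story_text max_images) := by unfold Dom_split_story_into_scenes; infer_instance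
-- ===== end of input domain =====

-- B replaces A's single buffered pass (per-index membership tests, in-loop flushing) with a staged
-- pipeline: chunk the paragraphs into segments at the sorted boundary positions, then flat-map each
-- segment into its text/image dict pair (objective: alternative decomposition).
-- Equivalence is about the return value only; neither version mutates its arguments.

-- ===== PORT A =====
-- loop body of A's 'for idx, para in enumerate(paragraphs)' (extracted as a named helper for the fold)
def pvAStep (image_positions : List Int)
    (st : List (List (String × String)) × List String) (ip : Int × String) :
    List (List (String × String)) × List String :=
  let buffer := st.2 ++ [ip.2]
  if ip.1 ∈ image_positions then
    let text_chunk := PySem.Str.strip (PySem.Str.join "\n\n" buffer)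
    let result := if text_chunk ≠ "" then st.1 ++ [[("type", "text"), ("content", text_chunk)]] else st.1
    -- buffer[-1]: buffer is nonempty here (a paragraph was just appended), so the total pyGetD is exact
    let excerpt := if 2 ≤ buffer.length then PySem.Str.join "\n\n" (PySem.List.slice buffer (some (-2)) none)
                   else PySem.List.pyGetD buffer (-1) ""
    (result ++ [[("type", "image"), ("scene_text", excerpt)]], [])
  else (st.1, buffer)

def split_story_into_scenes (story_text : String) (max_images : Int) : List (List (String × String)) :=
  let paragraphs := (((PySem.Str.split? story_text "\n").getD []).filter
      (fun p => PySem.Str.strip p != "")).map PySem.Str.strip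
  if paragraphs = [] then [[("type", "text"), ("content", story_text)]]
  else
    let total : Int := paragraphs.length
    let slots := min max_images total
    if slots = 0 then [[("type", "text"), ("content", story_text)]]
    else
      let step := max 1 (PySem.Int.floordiv total (slots + 1))
      let image_positions := PySem.Set.ofList
        ((PySem.List.pyRange 1 (slots + 1) 1).map (fun i => min (total - 1) (step * i)))
      let st := (PySem.List.enumerate paragraphs).foldl (pvAStep image_positions) ([], [])
      if st.2 ≠ [] then st.1 ++ [[("type", "text"), ("content", PySem.Str.join "\n\n" st.2)]]
      else st.1

-- ===== PORT B =====
-- Source B stage 1: consume the cuts one by one, slicing the segment ending at each cut off 'rest'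
def pvChunks (cuts : List Int) (prev : Int) (rest : List String) :
    List (List String) × List String :=
  match cuts with
  | [] => ([], rest)
  | pos :: more =>
      let seg := PySem.List.slice rest none (some (pos - prev))
      let r := pvChunks more pos (PySem.List.slice rest (some (pos - prev)) none)
      (seg :: r.1, r.2)

-- Source B stage 2: the two dicts one segment contributes to the scene list
def pvScenePair (seg : List String) : List (List (String × String)) :=
  [[("type", "text"), ("content", PySem.Str.join "\n\n" seg)],
   [("type", "image"), ("scene_text", PySem.Str.join "\n\n" (PySem.List.slice seg (some (-2)) none))]]

def split_story_into_scenes_alt (story_text : String) (max_images : Int) : List (List (String × String)) :=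
  let paragraphs := (((PySem.Str.split? story_text "\n").getD []).map PySem.Str.strip).filter
      (fun q => q != "")
  if paragraphs = [] then [[("type", "text"), ("content", story_text)]]
  else
    let total : Int := paragraphs.length
    let slots := min max_images total
    if slots = 0 then [[("type", "text"), ("content", story_text)]]
    else
      let step := max 1 (PySem.Int.floordiv total (slots + 1))
      let cuts := PySem.List.sorted (PySem.Set.ofList
        ((PySem.List.pyRange 1 (slots + 1) 1).map (fun i => min (total - 1) (step * i)))) (fun x => x) false
      let cr := pvChunks cuts (-1) paragraphs
      let scenes := cr.1.flatMap pvScenePair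
      if cr.2 ≠ [] then
        scenes ++ [[("type", "text"), ("content", PySem.Str.join "\n\n" cr.2)]]
      else scenes

-- ===== PRECONDITION & SPEC =====
-- Pre_ excludes exactly the inputs where Python A raises ZeroDivisionError computing the step
-- (max_images = -1 together with at least one non-whitespace line); B raises there too.
-- The Lean ports are total (PySem floordiv is defined at divisor 0), so the equivalence proof
-- does not need this hypothesis; Pre_ only fences off the inputs where the Pythons raise.
def Pre_split_story_into_scenes (story_text : String) (max_images : Int) : Prop :=
  max_images ≠ -1 ∨ ((PySem.Str.split? story_text "\n").getD []).all (fun p => PySem.Str.strip p == "") = true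
instance (story_text : String) (max_images : Int) : Decidable (Pre_split_story_into_scenes story_text max_images) := by
  unfold Pre_split_story_into_scenes; infer_instance

def pvWitness_split_story_into_scenes : String × Int := ("A hero sets out.\nA dragon appears.\nThey talk.", 2)

def Spec_split_story_into_scenes (story_text : String) (max_images : Int) (out : List (List (String × String))) : Prop := out = split_story_into_scenes_alt story_text max_images
instance (story_text : String) (max_images : Int) (out : List (List (String × String))) : Decidable (Spec_split_story_into_scenes story_text max_images out) := by unfold Spec_split_story_into_scenes; infer_instance

-- ===== CLAIM (what is proved, stated in full; the proofs are below) =====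
def Claim_equal_split_story_into_scenes : Prop := ∀ (story_text : String) (max_images : Int), Dom_split_story_into_scenes story_text max_images → Pre_split_story_into_scenes story_text max_images → Spec_split_story_into_scenes story_text max_images (split_story_into_scenes story_text max_images)

-- ===== LEMMAS AND PROOFS =====

-- a char list that is nonempty and has non-whitespace first and last characters
def pvNE (cs : List Char) : Prop :=
  cs ≠ [] ∧ (∀ c, cs.head? = some c → PySem.Chars.isspace c = false)
         ∧ (∀ c, cs.getLast? = some c → PySem.Chars.isspace c = false)

-- the two scene dicts A produces for one flushed buffer
def pvSeg (seg : List String) : List (List (String × String)) :=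
  [[("type", "text"), ("content", PySem.Str.join "\n\n" seg)],
   [("type", "image"), ("scene_text",
      if 2 ≤ seg.length then PySem.Str.join "\n\n" (PySem.List.slice seg (some (-2)) none)
      else PySem.List.pyGetD seg (-1) "")]]

-- normal form of A's loop: consume the (sorted) boundaries one by one,
-- cutting successive segments off the remaining paragraph suffix (s = absolute index of the suffix head)
def pvRun (bs : List Int) (ps : List String) (s : Int) (acc : List (List (String × String))) :
    List (List (String × String)) × List String :=
  match bs with
  | [] => (acc, ps)
  | b :: bs' => pvRun bs' (ps.drop ((b - s).toNat + 1)) (b + 1) (acc ++ pvSeg (ps.take ((b - s).toNat + 1)))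

lemma pvNE_lstrip_eq {cs : List Char} (h : pvNE cs) : PySem.Chars.lstrip cs = cs := by
  obtain ⟨hne, hh, _⟩ := h
  cases cs with
  | nil => simp at hne
  | cons c t =>
    simp only [PySem.Chars.lstrip, List.dropWhile_cons]
    rw [hh c rfl]
    simp

lemma pvNE_rstrip_eq {cs : List Char} (h : pvNE cs) : PySem.Chars.rstrip cs = cs := by
  obtain ⟨hne, _, hl⟩ := h
  have hrev : cs.reverse ≠ [] := by simpa using hne
  obtain ⟨d, r, hdr⟩ := List.exists_cons_of_ne_nil hrev
  have hd : cs.getLast? = some d := by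
    rw [← List.head?_reverse, hdr]; rfl
  simp only [PySem.Chars.rstrip, hdr, List.dropWhile_cons]
  rw [hl d hd, ← hdr]
  simp

lemma pvNE_strip_eq {cs : List Char} (h : pvNE cs) : PySem.Chars.strip cs = cs := by
  simp only [PySem.Chars.strip, pvNE_lstrip_eq h, pvNE_rstrip_eq h]

lemma pv_head_dropWhile {p : Char → Bool} {l : List Char} {c : Char}
    (h : (l.dropWhile p).head? = some c) : p c = false := by
  induction l with
  | nil => simp at h
  | cons a t ih =>
    rw [List.dropWhile_cons] at h
    by_cases hp : p a = true
    · rw [if_pos hp] at h; exact ih h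
    · rw [if_neg hp] at h
      simp only [List.head?_cons, Option.some.injEq] at h
      subst h; simpa using hp

lemma pvNE_strip {cs : List Char} (h : PySem.Chars.strip cs ≠ []) : pvNE (PySem.Chars.strip cs) := by
  refine ⟨h, ?_, ?_⟩
  · -- the strip is a prefix of the lstrip, whose head is non-space
    intro c hc
    have hpre : PySem.Chars.strip cs <+: PySem.Chars.lstrip cs := by
      simp only [PySem.Chars.strip, PySem.Chars.rstrip]
      have hsuf : List.dropWhile PySem.Chars.isspace (PySem.Chars.lstrip cs).reverse <:+ (PySem.Chars.lstrip cs).reverse :=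
        List.dropWhile_suffix _
      simpa using hsuf.reverse
    have hc' : (PySem.Chars.lstrip cs).head? = some c := by
      obtain ⟨t, ht⟩ := hpre
      rw [← ht]
      cases hst : PySem.Chars.strip cs with
      | nil => exact absurd hst h
      | cons x r =>
        rw [hst] at hc
        simp only [List.head?_cons, Option.some.injEq] at hc
        simp [hc]
    exact pv_head_dropWhile (by simpa [PySem.Chars.lstrip] using hc')
  · intro c hc
    have : ((PySem.Chars.strip cs).reverse).head? = some c := by
      rw [List.head?_reverse]; exact hc
    simp only [PySem.Chars.strip, PySem.Chars.rstrip, List.reverse_reverse] at this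
    exact pv_head_dropWhile this

lemma pvNE_join (sep : List Char) :
    ∀ parts : List (List Char), parts ≠ [] → (∀ x ∈ parts, pvNE x) →
      pvNE (PySem.Chars.join sep parts) := by
  intro parts
  induction parts with
  | nil => intro h; simp at h
  | cons a rest ih =>
    intro _ hall
    have ha : pvNE a := hall a (by simp)
    cases rest with
    | nil =>
      simpa [PySem.Chars.join, List.intercalate] using ha
    | cons b r =>
      have hrest : pvNE (PySem.Chars.join sep (b :: r)) :=
        ih (by simp) (fun x hx => hall x (by simp [hx]))
      have hjoin : PySem.Chars.join sep (a :: b :: r) = a ++ (sep ++ PySem.Chars.join sep (b :: r)) := by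
        simp [PySem.Chars.join, List.intercalate]
      refine ⟨?_, ?_, ?_⟩
      · rw [hjoin]; exact fun hemp => ha.1 (by simpa using (List.append_eq_nil_iff.mp hemp).1
        )
      · intro c hc
        rw [hjoin] at hc
        obtain ⟨x, t, hxt⟩ := List.exists_cons_of_ne_nil ha.1
        rw [hxt] at hc
        simp only [List.cons_append, List.head?_cons, Option.some.injEq] at hc
        exact ha.2.1 c (by rw [hxt, ← hc]; rfl)
      · intro c hc
        rw [hjoin, List.getLast?_append_of_ne_nil, List.getLast?_append_of_ne_nil] at hc
        · exact hrest.2.2 c hc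
        · exact hrest.1
        · exact fun hemp => hrest.1 (by simpa using (List.append_eq_nil_iff.mp hemp).2)

lemma pv_toList_ne_nil {s : String} (h : s ≠ "") : s.toList ≠ [] := by
  intro hl
  exact h (String.toList_inj.mp (by simpa using hl))

lemma pv_strip_join (seg : List String) (hne : seg ≠ []) (hNE : ∀ e ∈ seg, pvNE e.toList) :
    PySem.Str.strip (PySem.Str.join "\n\n" seg) = PySem.Str.join "\n\n" seg
      ∧ PySem.Str.join "\n\n" seg ≠ "" := by
  have hj : pvNE (PySem.Str.join "\n\n" seg).toList := by
    rw [PySem.Str.toList_join]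
    exact pvNE_join _ _ (by simpa using hne) (by
      intro x hx
      obtain ⟨e, he, rfl⟩ := List.mem_map.mp hx
      exact hNE e he)
  constructor
  · have : (PySem.Str.strip (PySem.Str.join "\n\n" seg)).toList = (PySem.Str.join "\n\n" seg).toList := by
      rw [PySem.Str.toList_strip, pvNE_strip_eq hj]
    exact String.toList_inj.mp this
  · intro hemp
    exact hj.1 (by rw [hemp]; rfl)

lemma pv_paragraphs_NE (story_text : String) :
    ∀ e ∈ (((PySem.Str.split? story_text "\n").getD []).filter
      (fun p => PySem.Str.strip p != "")).map PySem.Str.strip, pvNE e.toList := by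
  intro e he
  obtain ⟨p, hp, rfl⟩ := List.mem_map.mp he
  have hcond := List.of_mem_filter hp
  have hne : PySem.Str.strip p ≠ "" := by simpa using hcond
  rw [PySem.Str.toList_strip]
  exact pvNE_strip (by
    rw [← PySem.Str.toList_strip]
    exact pv_toList_ne_nil hne)

-- the A-loop over a stretch with no image position only accumulates the buffer
lemma pv_loopA_nohit (P : List Int) :
    ∀ (ps : List String) (s : Int) (acc : List (List (String × String))) (buf : List String),
      (∀ k : Nat, k < ps.length → ¬ ((s + k) ∈ P)) →
      (PySem.List.enumerate ps s).foldl (pvAStep P) (acc, buf) = (acc, buf ++ ps) := by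
  intro ps
  induction ps with
  | nil => intro s acc buf _; simp [PySem.List.enumerate_nil]
  | cons x xs ih =>
    intro s acc buf h
    rw [PySem.List.enumerate_cons, List.foldl_cons]
    have h0 : ¬ (s ∈ P) := by simpa using h 0 (by simp)
    have hstep : pvAStep P (acc, buf) (s, x) = (acc, buf ++ [x]) := by
      simp [pvAStep, h0]
    rw [hstep, ih (s + 1) acc (buf ++ [x]) (by
      intro k hk
      have := h (k + 1) (by simpa using Nat.succ_lt_succ hk)
      intro hmem; apply this
      have : s + 1 + (k : Int) = s + ((k : Nat) + 1 : Nat) := by push_cast; ring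
      rwa [← this])]
    simp

-- the A-loop testing membership in P equals pvRun over the strictly increasing list bs,
-- provided P and bs agree on every index ≥ s
lemma pv_loopA_eq :
    ∀ (bs P : List Int) (ps : List String) (s : Int) (acc : List (List (String × String))),
      0 ≤ s → bs.Pairwise (· < ·) →
      (∀ i : Int, s ≤ i → (i ∈ P ↔ i ∈ bs)) →
      (∀ b ∈ bs, s ≤ b ∧ b < s + ps.length) →
      (∀ e ∈ ps, pvNE e.toList) →
      (PySem.List.enumerate ps s).foldl (pvAStep P) (acc, []) = pvRun bs ps s acc := by
  intro bs
  induction bs with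
  | nil =>
    intro P ps s acc _ _ hiff _ _
    rw [pv_loopA_nohit P ps s acc [] (by
      intro j _ hmem
      have hj : s ≤ s + (j : Int) := by omega
      simpa using (hiff _ hj).mp hmem)]
    rfl
  | cons b bs' ih =>
    intro P ps s acc hs hpair hiff hbnd hNE
    obtain ⟨hsb, hblt⟩ := hbnd b (by simp)
    have hbs' : ∀ x ∈ bs', b < x := fun x hx => (List.pairwise_cons.mp hpair).1 x hx
    set k : Nat := (b - s).toNat with hk
    have hkb : (k : Int) = b - s := by omega
    have hklen : k < ps.length := by omega
    -- split the paragraph list at the hit position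
    have hsplit : ps = ps.take k ++ (ps[k] :: ps.drop (k + 1)) := by
      rw [← List.drop_eq_getElem_cons hklen, List.take_append_drop]
    conv_lhs => rw [hsplit]
    rw [PySem.List.enumerate_append, List.foldl_append]
    have hlen_take : (ps.take k).length = k := by rw [List.length_take]; omega
    -- the first k paragraphs hit no position
    rw [pv_loopA_nohit P (ps.take k) s acc [] (by
      intro j hj
      rw [hlen_take] at hj
      intro hmem
      have hj' : s ≤ s + (j : Int) := by omega
      rcases List.mem_cons.mp ((hiff _ hj').mp hmem) with h1 | h2
      · omega
      · have := hbs' _ h2; omega)]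
    rw [hlen_take, PySem.List.enumerate_cons, List.foldl_cons]
    simp only [List.nil_append]
    -- the hit step
    have hbuf_ne : ps.take k ++ [ps[k]] ≠ [] := by
      intro hcontr
      have := congrArg List.length hcontr
      simp at this
      rw [this] at hklen
      simp at hklen
    have hbufNE : ∀ e ∈ ps.take k ++ [ps[k]], pvNE e.toList := by
      intro e he
      rcases List.mem_append.mp he with h1 | h2
      · exact hNE e (List.mem_of_mem_take h1)
      · rcases List.mem_singleton.mp h2 with rfl
        exact hNE _ (List.getElem_mem hklen)
    obtain ⟨hstrip, hne''⟩ := pv_strip_join _ hbuf_ne hbufNE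
    have hsk : s + (k : Int) = b := by omega
    have hbP : (s + (k : Int)) ∈ P := by
      rw [hsk]
      exact (hiff b hsb).mpr (by simp)
    have hstep : pvAStep P (acc, ps.take k) (s + (k : Int), ps[k])
        = (acc ++ pvSeg (ps.take k ++ [ps[k]]), []) := by
      simp only [pvAStep]
      rw [if_pos hbP]
      simp only [hstrip]
      rw [if_pos hne'']
      simp [pvSeg, List.append_assoc]
    rw [hstep]
    have htake : ps.take k ++ [ps[k]] = ps.take (k + 1) := by
      rw [List.take_add_one, List.getElem?_eq_getElem hklen]
      rfl
    rw [htake]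
    have hrec := ih P (ps.drop (k + 1)) (s + (k : Int) + 1) (acc ++ pvSeg (ps.take (k + 1)))
      (by omega)
      (List.pairwise_cons.mp hpair).2
      (by
        intro i hi
        rw [hiff i (by omega)]
        simp only [List.mem_cons]
        exact ⟨fun h => h.resolve_left (by omega), fun h => Or.inr h⟩)
      (by
        intro x hx
        obtain ⟨hx1, hx2⟩ := hbnd x (by simp [hx])
        have hlt := hbs' x hx
        constructor
        · omega
        · rw [List.length_drop]; omega)
      (fun e he => hNE e (List.mem_of_mem_drop he))
    rw [hrec]
    show pvRun bs' (ps.drop (k + 1)) (s + (k : Int) + 1) (acc ++ pvSeg (ps.take (k + 1)))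
      = pvRun (b :: bs') ps s acc
    rw [pvRun, ← hk]
    have hsk1 : s + (k : Int) + 1 = b + 1 := by omega
    rw [hsk1]

-- A's conditional excerpt agrees with B's unconditional join over seg[-2:] on nonempty segments
lemma pv_seg_eq_scenePair (seg : List String) (hne : seg ≠ []) : pvSeg seg = pvScenePair seg := by
  by_cases h2 : 2 ≤ seg.length
  · simp [pvSeg, pvScenePair, h2]
  · match seg, hne with
    | [x], _ =>
      have hsl : PySem.List.slice [x] (some (-2)) none = [x] := by
        rw [PySem.List.slice_from_neg_ofNat [x] 2 (by omega)]
        simp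
      simp [pvSeg, pvScenePair, hsl, PySem.Str.join, PySem.Chars.join, List.intercalate,
        PySem.List.pyGetD, PySem.List.pyGet?, PySem.List.pyIdx?]
    | x :: y :: r, _ => simp at h2

-- A's loop normal form is exactly B's chunk-then-flatMap pipeline
lemma pv_run_chunks :
    ∀ (bs : List Int) (ps : List String) (s : Int) (acc : List (List (String × String))),
      0 ≤ s → bs.Pairwise (· < ·) →
      (∀ b ∈ bs, s ≤ b ∧ b < s + ps.length) →
      pvRun bs ps s acc
        = (acc ++ (pvChunks bs (s - 1) ps).1.flatMap pvScenePair, (pvChunks bs (s - 1) ps).2) := by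
  intro bs
  induction bs with
  | nil => intro ps s acc _ _ _; simp [pvRun, pvChunks]
  | cons b bs' ih =>
    intro ps s acc hs hpair hbnd
    obtain ⟨hsb, hblt⟩ := hbnd b (by simp)
    have hbs' : ∀ x ∈ bs', b < x := fun x hx => (List.pairwise_cons.mp hpair).1 x hx
    have hlen : 0 < ps.length := by omega
    have hkpos : (b - (s - 1)).toNat = (b - s).toNat + 1 := by omega
    have htake : PySem.List.slice ps none (some (b - (s - 1)))
        = ps.take ((b - s).toNat + 1) := by
      rw [PySem.List.slice_to ps (by omega), hkpos]
    have hdrop : PySem.List.slice ps (some (b - (s - 1))) none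
        = ps.drop ((b - s).toNat + 1) := by
      rw [PySem.List.slice_from ps (by omega), hkpos]
    have hps_ne : ps ≠ [] := List.length_pos_iff.mp hlen
    have hseg_ne : ps.take ((b - s).toNat + 1) ≠ [] := by
      simp [List.take_eq_nil_iff, hps_ne]
    rw [pvRun]
    rw [ih (ps.drop ((b - s).toNat + 1)) (b + 1) (acc ++ pvSeg (ps.take ((b - s).toNat + 1)))
      (by omega)
      (List.pairwise_cons.mp hpair).2
      (by
        intro x hx
        obtain ⟨hx1, hx2⟩ := hbnd x (by simp [hx])
        have := hbs' x hx
        rw [List.length_drop]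
        constructor <;> omega)]
    show _ = (acc ++ (pvChunks (b :: bs') (s - 1) ps).1.flatMap pvScenePair,
              (pvChunks (b :: bs') (s - 1) ps).2)
    rw [pvChunks]
    simp only [htake, hdrop, List.flatMap_cons]
    have hprev : b + 1 - 1 = b := by omega
    rw [hprev, pv_seg_eq_scenePair _ hseg_ne]
    simp [List.append_assoc]

-- the common core: given nonempty well-formed paragraphs, A's buffer loop and
-- B's chunk/flatMap pipeline produce the same scene list
lemma pv_core (ps : List String) (slots step : Int)
    (hne : ps ≠ []) (hstep : 1 ≤ step)
    (hNE : ∀ e ∈ ps, pvNE e.toList) :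
    (let st := (PySem.List.enumerate ps).foldl
        (pvAStep (PySem.Set.ofList ((PySem.List.pyRange 1 (slots + 1) 1).map
          (fun i => min ((ps.length : Int) - 1) (step * i))))) ([], []);
     if st.2 ≠ [] then st.1 ++ [[("type", "text"), ("content", PySem.Str.join "\n\n" st.2)]] else st.1)
    = (let cr := pvChunks (PySem.List.sorted (PySem.Set.ofList ((PySem.List.pyRange 1 (slots + 1) 1).map
          (fun i => min ((ps.length : Int) - 1) (step * i)))) (fun x => x) false) (-1) ps;
       let scenes := cr.1.flatMap pvScenePair;
       if cr.2 ≠ [] then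
         scenes ++ [[("type", "text"), ("content", PySem.Str.join "\n\n" cr.2)]]
       else scenes) := by
  have htot : 1 ≤ (ps.length : Int) := by
    have := List.length_pos_iff.mpr hne
    omega
  set positions : List Int := (PySem.List.pyRange 1 (slots + 1) 1).map
    (fun i => min ((ps.length : Int) - 1) (step * i)) with hpos
  set P := PySem.Set.ofList positions with hP
  set bs := PySem.List.sorted P (fun x => x) false with hbs
  have hmemP : ∀ x ∈ P, 0 ≤ x ∧ x < (ps.length : Int) := by
    intro x hx
    have hx' : x ∈ positions := (PySem.Set.mem_ofList positions x).mp hx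
    obtain ⟨i, hi, rfl⟩ := List.mem_map.mp hx'
    have hi' := PySem.List.mem_pyRange_one.mp hi
    have h1i : 1 ≤ i := hi'.1
    have hsi : 1 ≤ step * i := by nlinarith
    constructor
    · omega
    · have := min_le_left ((ps.length : Int) - 1) (step * i)
      omega
  have hmem_bs : ∀ i, i ∈ bs ↔ i ∈ P := fun i => PySem.List.mem_sorted P (fun x => x) false i
  have hpair : bs.Pairwise (· < ·) := PySem.List.sorted_ofList_pairwise_lt positions
  have hmembs : ∀ x ∈ bs, 0 ≤ x ∧ x < (ps.length : Int) :=
    fun x hx => hmemP x ((hmem_bs x).mp hx)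
  have hbnd : ∀ b ∈ bs, (0 : Int) ≤ b ∧ b < 0 + ps.length :=
    fun b hb => by have := hmembs b hb; exact ⟨this.1, by omega⟩
  have hA : (PySem.List.enumerate ps).foldl (pvAStep P) ([], []) = pvRun bs ps 0 [] :=
    pv_loopA_eq bs P ps 0 [] le_rfl hpair (fun i _ => (hmem_bs i).symm) hbnd hNE
  have hAB : pvRun bs ps 0 []
      = ((pvChunks bs (-1) ps).1.flatMap pvScenePair, (pvChunks bs (-1) ps).2) := by
    have := pv_run_chunks bs ps 0 [] le_rfl hpair hbnd
    norm_num at this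
    exact this
  simp only [hA, hAB]

-- ===== VERDICT (by name: the statement is the Claim_ definition above) =====
theorem split_story_into_scenes_spec : Claim_equal_split_story_into_scenes := by
  intro story_text max_images _ _
  unfold Spec_split_story_into_scenes
  unfold split_story_into_scenes split_story_into_scenes_alt
  -- B strips first and then filters; this is the same paragraph list as A's filter-then-strip
  simp only [List.filter_map, Function.comp_def]
  set paragraphs := (((PySem.Str.split? story_text "\n").getD []).filter
      (fun p => PySem.Str.strip p != "")).map PySem.Str.strip with hpar
  by_cases hp : paragraphs = []
  · simp only [hp, reduceIte]
  · rw [if_neg hp, if_neg hp]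
    by_cases hs : min max_images (paragraphs.length : Int) = 0
    · rw [if_pos hs, if_pos hs]
    · rw [if_neg hs, if_neg hs]
      exact pv_core paragraphs (min max_images (paragraphs.length : Int))
        (max 1 (PySem.Int.floordiv (paragraphs.length : Int) (min max_images (paragraphs.length : Int) + 1)))
        hp (le_max_left _ _) (pv_paragraphs_NE story_text)
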